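-- pv_equiv track=rewrite | github.com/chekdata/chek-ego-miner | RuView/ui-react/scripts/workstation_server.py | normalize_asset_request_key
-- ===== SOURCE A (Python) =====
-- import posixpath
--
-- def is_safe_proxy_token(value: str) -> bool:
--     if not value:
--         return True
--     sanitized = (
--         value.replace("-", "")
--         .replace("_", "")
--         .replace(".", "")
--         .replace("~", "")
--     )
--     return sanitized.isalnum()
--
-- def normalize_asset_request_key(raw_path: str) -> str | None:
--     value = raw_path.strip("/")
--     if not value:
--         return ""
--     normalized = posixpath.normpath("/" + value).lstrip("/")
--     if not normalized:
--         return ""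
--     for segment in normalized.split("/"):
--         if not segment or segment in {".", ".."} or not is_safe_proxy_token(segment):
--             return None
--     return normalized
-- ===== SOURCE B (Python) =====
-- def is_safe_proxy_token(value: str) -> bool:
--     if not value:
--         return True
--     sanitized = (
--         value.replace("-", "")
--         .replace("_", "")
--         .replace(".", "")
--         .replace("~", "")
--     )
--     return sanitized.isalnum()
--
-- def normalize_asset_request_key(raw_path: str) -> str | None:
--     stack = []
--     for segment in raw_path.strip("/").split("/"):
--         if segment == "" or segment == ".":
--             continue
--         if segment == "..":
--             if stack:
--                 stack.pop()
--             continue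
--         stack.append(segment)
--     if all(is_safe_proxy_token(segment) for segment in stack):
--         return "/".join(stack)
--     return None
-- ===== Notes on version B (the rewrite author's own statement) =====
-- stated objective: simpler
-- what changed: B drops posixpath entirely: one split of the stripped path and a single stack walk (skip ''/'.', pop on '..'), then validate the final stack and join it, instead of A's build-a-path/normpath/lstrip/re-split/re-scan round trip.
import Mathlib
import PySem

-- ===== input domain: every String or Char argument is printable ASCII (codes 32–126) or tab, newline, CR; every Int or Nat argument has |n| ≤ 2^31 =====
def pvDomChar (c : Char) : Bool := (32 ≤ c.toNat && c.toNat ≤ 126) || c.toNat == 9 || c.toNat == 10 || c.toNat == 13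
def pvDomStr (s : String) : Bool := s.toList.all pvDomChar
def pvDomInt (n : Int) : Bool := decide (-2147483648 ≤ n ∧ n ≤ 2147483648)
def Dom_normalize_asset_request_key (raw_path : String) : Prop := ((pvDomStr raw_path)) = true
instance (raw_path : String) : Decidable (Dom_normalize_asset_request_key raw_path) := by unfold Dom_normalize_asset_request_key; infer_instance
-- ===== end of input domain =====

-- B replaces A's posixpath.normpath round trip (prefix '/', normpath, lstrip, re-split,
-- re-scan) by one split and a single stack walk that validates the final stack; simpler.

-- ===== PORT A =====

-- shared-module helper is_safe_proxy_token (used verbatim by both Source A and Source B)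
def pvIsSafeProxyToken (value : List Char) : Bool :=
  if value.isEmpty then true
  else
    PySem.Chars.strIsalnum
      (PySem.Chars.replace
        (PySem.Chars.replace
          (PySem.Chars.replace
            (PySem.Chars.replace value ['-'] []) ['_'] []) ['.'] []) ['~'] [])

-- hand port of CPython's posixpath.normpath (str case), step for step: same
-- initial-slash count, same component loop, same join and same final '.' fallback.
def pvNormpath (path : List Char) : List Char :=
  if path.isEmpty then ['.']
  else
    let initial_slashes : Nat :=
      if PySem.Chars.startswith path ['/'] then
        (if PySem.Chars.startswith path ['/', '/'] &&
            !PySem.Chars.startswith path ['/', '/', '/'] then 2 else 1)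
      else 0
    let comps := PySem.Chars.splitOn path ['/']
    let new_comps := comps.foldl (fun acc comp =>
      if comp.isEmpty || comp = ['.'] then acc
      else if comp ≠ ['.', '.'] || (initial_slashes = 0 && acc.isEmpty) ||
              (!acc.isEmpty && acc.getLast? = some ['.', '.']) then acc ++ [comp]
      else if !acc.isEmpty then acc.dropLast
      else acc) []
    let p := PySem.Chars.join ['/'] new_comps
    let p2 := List.replicate initial_slashes '/' ++ p
    if p2.isEmpty then ['.'] else p2

-- the for-loop over normalized.split("/") with its early 'return None'
def pvCheckSegs : List (List Char) → Bool
  | [] => true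
  | seg :: rest =>
    if seg.isEmpty || seg = ['.'] || seg = ['.', '.'] || !pvIsSafeProxyToken seg then false
    else pvCheckSegs rest

def normalize_asset_request_key (raw_path : String) : Option String :=
  let value := PySem.Chars.stripChars raw_path.toList ['/']
  if value.isEmpty then some ""
  else
    -- .lstrip("/") ported by hand as dropWhile over the char set {'/'}; exact
    let normalized := (pvNormpath ('/' :: value)).dropWhile (fun c => ['/'].contains c)
    if normalized.isEmpty then some ""
    else if pvCheckSegs (PySem.Chars.splitOn normalized ['/']) then
      some (String.ofList normalized)
    else none

-- ===== PORT B =====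

def pvStepB (stack : List (List Char)) (segment : List Char) : List (List Char) :=
  if segment = [] || segment = ['.'] then stack
  else if segment = ['.', '.'] then (if stack.isEmpty then stack else stack.dropLast)
  else stack ++ [segment]

def normalize_asset_request_key_alt (raw_path : String) : Option String :=
  let stack :=
    (PySem.Chars.splitOn (PySem.Chars.stripChars raw_path.toList ['/']) ['/']).foldl pvStepB []
  if stack.all (fun segment => pvIsSafeProxyToken segment) then
    some (String.ofList (PySem.Chars.join ['/'] stack))
  else none

-- ===== PRECONDITION & SPEC =====
def Spec_normalize_asset_request_key (raw_path : String) (out : Option String) : Prop := out = normalize_asset_request_key_alt raw_path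
instance (raw_path : String) (out : Option String) : Decidable (Spec_normalize_asset_request_key raw_path out) := by unfold Spec_normalize_asset_request_key; infer_instance

-- ===== CLAIM (what is proved, stated in full; the proofs are below) =====
def Claim_equal_normalize_asset_request_key : Prop := ∀ (raw_path : String), Dom_normalize_asset_request_key raw_path → Spec_normalize_asset_request_key raw_path (normalize_asset_request_key raw_path)

-- ===== LEMMAS AND PROOFS =====

-- a simple structural split on one separator character, and its identification
-- with PySem.Chars.splitOn on a one-character separator
def pvSplit (c : Char) : List Char → List (List Char)
  | [] => [[]]
  | a :: rest =>
    if a = c then [] :: pvSplit c rest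
    else
      match pvSplit c rest with
      | h :: t => (a :: h) :: t
      | [] => [[a]]

theorem pvSplit_ne_nil (c : Char) (l : List Char) : pvSplit c l ≠ [] := by
  induction l with
  | nil => simp [pvSplit]
  | cons a rest ih =>
    simp only [pvSplit]
    split
    · simp
    · split <;> simp_all

theorem pvSplitOn_go_spec (c : Char) (l cur acc : _) (fuel : Nat) (h : l.length ≤ fuel) :
    PySem.Chars.splitOn.go [c] fuel l cur acc =
      acc.reverse ++
        (match pvSplit c l with
         | h :: t => (cur.reverse ++ h) :: t
         | [] => [cur.reverse]) := by
  induction l generalizing cur acc fuel with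
  | nil =>
    cases fuel with
    | zero => simp [PySem.Chars.splitOn.go, pvSplit]
    | succ f => simp [PySem.Chars.splitOn.go, pvSplit]
  | cons a rest ih =>
    cases fuel with
    | zero => simp at h
    | succ f =>
      simp only [List.length_cons, Nat.succ_le_succ_iff] at h
      by_cases hac : a = c
      · subst hac
        have hpre : [a].isPrefixOf (a :: rest) = true := by simp [List.isPrefixOf]
        simp only [PySem.Chars.splitOn.go, hpre, if_pos, List.length_cons,
          List.length_nil, List.drop_succ_cons, List.drop_zero, pvSplit]
        rw [ih [] (cur.reverse :: acc) f h]
        cases hsp : pvSplit a rest with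
        | nil => exact absurd hsp (pvSplit_ne_nil a rest)
        | cons h1 t1 => simp
      · have hpre : [c].isPrefixOf (a :: rest) = false := by
          simp [List.isPrefixOf]
          exact fun hh => absurd (Eq.symm hh) hac
        simp only [PySem.Chars.splitOn.go, hpre, Bool.false_eq_true, if_false,
          pvSplit, if_neg hac]
        rw [ih (a :: cur) acc f h]
        cases hsp : pvSplit c rest with
        | nil => exact absurd hsp (pvSplit_ne_nil c rest)
        | cons h1 t1 => simp

theorem pvSplitOn_eq (c : Char) (l : List Char) :
    PySem.Chars.splitOn l [c] = pvSplit c l := by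
  rw [PySem.Chars.splitOn, pvSplitOn_go_spec c l [] [] (l.length + 1) (by omega)]
  cases hsp : pvSplit c l with
  | nil => exact absurd hsp (pvSplit_ne_nil c l)
  | cons h1 t1 => simp

theorem pvSplit_no_sep (c : Char) (l : List Char) : ∀ x ∈ pvSplit c l, c ∉ x := by
  induction l with
  | nil => simp [pvSplit]
  | cons a rest ih =>
    simp only [pvSplit]
    split
    · intro x hx
      rcases List.mem_cons.1 hx with h | h
      · simp [h]
      · exact ih x h
    · rename_i hac
      cases hsp : pvSplit c rest with
      | nil => exact absurd hsp (pvSplit_ne_nil c rest)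
      | cons h1 t1 =>
        intro x hx
        rcases List.mem_cons.1 hx with h | h
        · subst h
          intro hmem
          rcases List.mem_cons.1 hmem with h | h
          · exact hac h.symm
          · exact ih h1 (by simp [hsp]) h
        · exact ih x (by simp [hsp, h])

theorem pvSplit_of_no_sep (c : Char) (x : List Char) (hx : c ∉ x) : pvSplit c x = [x] := by
  induction x with
  | nil => simp [pvSplit]
  | cons a rest ih =>
    simp only [List.mem_cons, not_or] at hx
    simp only [pvSplit, if_neg (fun h => hx.1 (Eq.symm h)), ih hx.2]

theorem pvSplit_append (c : Char) (x m : List Char) (hx : c ∉ x) :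
    pvSplit c (x ++ c :: m) = x :: pvSplit c m := by
  induction x with
  | nil => simp [pvSplit]
  | cons a rest ih =>
    simp only [List.mem_cons, not_or] at hx
    simp only [List.cons_append, pvSplit, if_neg (fun h => hx.1 (Eq.symm h)), ih hx.2]

theorem pvSplit_intercalate (c : Char) (stack : List (List Char)) (hne : stack ≠ [])
    (hsep : ∀ x ∈ stack, c ∉ x) :
    pvSplit c (List.intercalate [c] stack) = stack := by
  induction stack with
  | nil => exact absurd rfl hne
  | cons x t ih =>
    cases t with
    | nil => simp [List.intercalate, List.intersperse, pvSplit_of_no_sep c x (hsep x (by simp))]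
    | cons y t' =>
      have : List.intercalate [c] (x :: y :: t') = x ++ c :: List.intercalate [c] (y :: t') := by
        simp [List.intercalate, List.intersperse]
      rw [this, pvSplit_append c x _ (hsep x (by simp)),
        ih (by simp) (fun z hz => hsep z (by simp [List.mem_cons.1 hz]))]

-- the invariant every element of the stack satisfies
def pvGood (x : List Char) : Prop :=
  x ≠ [] ∧ x ≠ ['.'] ∧ x ≠ ['.', '.'] ∧ '/' ∉ x

-- A's normpath component loop (with initial_slashes = 1) agrees with B's stack
-- step and preserves the invariant
theorem pv_fold_eq (l : List (List Char)) :
    ∀ acc, (∀ x ∈ acc, pvGood x) → (∀ x ∈ l, '/' ∉ x) →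
    (List.foldl (fun acc comp =>
      if comp.isEmpty || comp = ['.'] then acc
      else if comp ≠ ['.', '.'] || ((1 : Nat) = 0 && acc.isEmpty) ||
              (!acc.isEmpty && acc.getLast? = some ['.', '.']) then acc ++ [comp]
      else if !acc.isEmpty then acc.dropLast
      else acc) acc l = List.foldl pvStepB acc l ∧
      ∀ x ∈ List.foldl pvStepB acc l, pvGood x) := by
  induction l with
  | nil => exact fun acc hacc _ => ⟨rfl, hacc⟩
  | cons comp rest ih =>
    intro acc hacc hl
    have hrest : ∀ x ∈ rest, '/' ∉ x := fun x hx => hl x (by simp [hx])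
    have hstep : (if comp.isEmpty || comp = ['.'] then acc
      else if comp ≠ ['.', '.'] || ((1 : Nat) = 0 && acc.isEmpty) ||
              (!acc.isEmpty && acc.getLast? = some ['.', '.']) then acc ++ [comp]
      else if !acc.isEmpty then acc.dropLast
      else acc) = pvStepB acc comp ∧ ∀ x ∈ pvStepB acc comp, pvGood x := by
      by_cases hce : comp = []
      · subst hce
        exact ⟨by simp [pvStepB], by simpa [pvStepB] using hacc⟩
      · by_cases hcd : comp = ['.']
        · subst hcd
          exact ⟨by simp [pvStepB], by simpa [pvStepB] using hacc⟩
        · by_cases h2 : comp = ['.', '.']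
          · subst h2
            have hlast : acc.getLast? ≠ some ['.', '.'] := fun hl' =>
              (hacc _ (List.mem_of_getLast? hl')).2.2.1 rfl
            constructor
            · by_cases hae : acc.isEmpty <;> simp [pvStepB, hlast, hae]
            · by_cases hae : acc.isEmpty
              · intro x hx; exact hacc x (by simpa [pvStepB, hae] using hx)
              · intro x hx
                have hx' : x ∈ acc.dropLast := by simpa [pvStepB, hae] using hx
                exact hacc x ((List.dropLast_sublist acc).mem hx')
          · constructor
            · simp [pvStepB, hce, hcd, h2]
            · intro x hx
              have hx' : x ∈ acc ++ [comp] := by simpa [pvStepB, hce, hcd, h2] using hx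
              rcases List.mem_append.1 hx' with h | h
              · exact hacc x h
              · have hxc : x = comp := by simpa using h
                subst hxc
                exact ⟨hce, hcd, h2, hl x (by simp)⟩
    rw [List.foldl_cons, List.foldl_cons, hstep.1]
    exact ih (pvStepB acc comp) hstep.2 hrest

theorem pvCheckSegs_eq_all (stack : List (List Char)) (h : ∀ x ∈ stack, pvGood x) :
    pvCheckSegs stack = stack.all (fun segment => pvIsSafeProxyToken segment) := by
  induction stack with
  | nil => simp [pvCheckSegs]
  | cons seg rest ih =>
    have hg := h seg (by simp)
    have hrest : ∀ x ∈ rest, pvGood x := fun x hx => h x (by simp [hx])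
    by_cases hs : pvIsSafeProxyToken seg <;>
      simp [pvCheckSegs, hg.1, hg.2.1, hg.2.2.1, hs, ih hrest]

theorem pv_head_dropWhile (p : Char → Bool) (l : List Char) (a : Char)
    (h : (l.dropWhile p).head? = some a) : p a = false := by
  induction l with
  | nil => simp at h
  | cons b rest ih =>
    rw [List.dropWhile_cons] at h
    split at h
    · exact ih h
    · simp_all

-- head of the strip result never lies in the stripped char set
theorem pv_strip_head (s chars : List Char) (a : Char)
    (h : (PySem.Chars.stripChars s chars).head? = some a) : chars.contains a = false := by
  have hdef : PySem.Chars.stripChars s chars =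
      List.rdropWhile (fun c => chars.contains c)
        (List.dropWhile (fun c => chars.contains c) s) := rfl
  rw [hdef] at h
  obtain ⟨u, hu⟩ := List.rdropWhile_prefix (fun c => chars.contains c)
    (List.dropWhile (fun c => chars.contains c) s)
  cases hres : List.rdropWhile (fun c => chars.contains c)
      (List.dropWhile (fun c => chars.contains c) s) with
  | nil => rw [hres] at h; simp at h
  | cons b r =>
    rw [hres] at h
    simp only [List.head?_cons, Option.some.injEq] at h
    rw [hres] at hu
    exact h ▸ pv_head_dropWhile (fun c => chars.contains c) s b (by rw [← hu]; simp)

theorem pv_normpath_cons (value : List Char) (hv : value ≠ [])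
    (hh : ∀ b, value.head? = some b → b ≠ '/') :
    pvNormpath ('/' :: value) =
      '/' :: List.intercalate ['/'] (List.foldl pvStepB [] (pvSplit '/' value)) := by
  obtain ⟨a, rest, rfl⟩ := List.exists_cons_of_ne_nil hv
  have ha : a ≠ '/' := hh a rfl
  have h1 : PySem.Chars.startswith ('/' :: a :: rest) ['/'] = true := by
    simp [PySem.Chars.startswith, List.isPrefixOf]
  have h2 : PySem.Chars.startswith ('/' :: a :: rest) ['/', '/'] = false := by
    simp [PySem.Chars.startswith, List.isPrefixOf]
    exact fun hc => absurd (Eq.symm hc) ha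
  have hsplit : PySem.Chars.splitOn ('/' :: a :: rest) ['/'] =
      [] :: pvSplit '/' (a :: rest) := by
    rw [pvSplitOn_eq]
    simp [pvSplit]
  have hfold := pv_fold_eq ([] :: pvSplit '/' (a :: rest)) [] (by simp)
    (by
      intro x hx
      rcases List.mem_cons.1 hx with h | h
      · simp [h]
      · exact pvSplit_no_sep '/' (a :: rest) x h)
  simp only [pvNormpath, List.isEmpty_cons, Bool.false_eq_true, if_false]
  rw [show (if PySem.Chars.startswith ('/' :: a :: rest) ['/'] then
        (if PySem.Chars.startswith ('/' :: a :: rest) ['/', '/'] &&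
            !PySem.Chars.startswith ('/' :: a :: rest) ['/', '/', '/'] then 2 else 1)
      else 0 : Nat) = 1 from by rw [h1, h2]; simp]
  rw [hsplit, hfold.1]
  have hB0 : pvStepB [] [] = [] := by simp [pvStepB]
  simp only [List.foldl_cons, hB0, PySem.Chars.join]
  have hrep : List.replicate 1 '/' = ['/'] := rfl
  rw [hrep]
  simp [List.intercalate]

-- the whole tail of A after normpath, against B's validate-and-join
theorem pv_main_branch (stack : List (List Char)) (hgood : ∀ x ∈ stack, pvGood x) :
    (if (('/' :: List.intercalate ['/'] stack).dropWhile
          (fun c => ['/'].contains c)).isEmpty then some ""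
     else if pvCheckSegs (pvSplit '/'
        (('/' :: List.intercalate ['/'] stack).dropWhile (fun c => ['/'].contains c))) then
       some (String.ofList (('/' :: List.intercalate ['/'] stack).dropWhile
          (fun c => ['/'].contains c)))
     else none) =
    (if stack.all (fun segment => pvIsSafeProxyToken segment) then
       some (String.ofList (PySem.Chars.join ['/'] stack))
     else none) := by
  cases stack with
  | nil => simp [List.intercalate, List.intersperse, PySem.Chars.join]
  | cons h t =>
    have hg := hgood h (by simp)
    obtain ⟨hc, h', rfl⟩ := List.exists_cons_of_ne_nil hg.1
    have hcs : ('/' : Char) ≠ hc := fun he => hg.2.2.2 (by simp [← he])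
    have hshape : ∃ z, List.intercalate ['/'] ((hc :: h') :: t) = hc :: (h' ++ z) := by
      cases t with
      | nil => exact ⟨[], by simp [List.intercalate, List.intersperse]⟩
      | cons y t' =>
        refine ⟨'/' :: List.intercalate ['/'] (y :: t'), ?_⟩
        simp [List.intercalate, List.intersperse]
    obtain ⟨z, hz⟩ := hshape
    have hdrop : ('/' :: List.intercalate ['/'] ((hc :: h') :: t)).dropWhile
        (fun c => ['/'].contains c) = List.intercalate ['/'] ((hc :: h') :: t) := by
      have hcs' : hc ≠ '/' := Ne.symm hcs
      rw [List.dropWhile_cons, hz, List.dropWhile_cons]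
      simp [hcs']
    rw [hdrop, hz]
    rw [← hz]
    have hresplit : pvSplit '/' (List.intercalate ['/'] ((hc :: h') :: t)) =
        (hc :: h') :: t :=
      pvSplit_intercalate '/' _ (by simp) (fun x hx => (hgood x hx).2.2.2)
    have hne : (List.intercalate ['/'] ((hc :: h') :: t)).isEmpty = false := by
      rw [hz]; simp
    rw [hne, hresplit, pvCheckSegs_eq_all _ hgood]
    simp only [Bool.false_eq_true, if_false, PySem.Chars.join]

-- ===== VERDICT (by name: the statement is the Claim_ definition above) =====
theorem normalize_asset_request_key_spec : Claim_equal_normalize_asset_request_key := by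
  intro raw _
  unfold Spec_normalize_asset_request_key normalize_asset_request_key normalize_asset_request_key_alt
  by_cases hv : (PySem.Chars.stripChars raw.toList ['/']).isEmpty
  · have hval : PySem.Chars.stripChars raw.toList ['/'] = [] := List.isEmpty_iff.1 hv
    rw [hval]
    simp only [List.isEmpty_nil, if_true, pvSplitOn_eq]
    have h1 : pvSplit '/' [] = [[]] := rfl
    have h2 : List.foldl pvStepB [] [[]] = [] := by simp [pvStepB]
    rw [h1, h2]
    simp only [List.all_nil, if_true]
    rfl
  · have hvne : PySem.Chars.stripChars raw.toList ['/'] ≠ [] := fun h => by simp [h] at hv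
    have hhead : ∀ b, (PySem.Chars.stripChars raw.toList ['/']).head? = some b → b ≠ '/' := by
      intro b hb heq
      have := pv_strip_head raw.toList ['/'] b hb
      rw [heq] at this
      simp at this
    have hfold := pv_fold_eq (pvSplit '/' (PySem.Chars.stripChars raw.toList ['/'])) []
      (by simp) (pvSplit_no_sep '/' _)
    simp only [pvSplitOn_eq]
    rw [if_neg hv, pv_normpath_cons _ hvne hhead]
    exact pv_main_branch _ hfold.2
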